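-- pv_equiv track=rewrite | github.com/Shahfareeze/CP125-Class-Repo | labs/lab04/exercise5/exercise5.py | find_momentum_days
-- ===== SOURCE A (Python) =====
-- def find_momentum_days(prices):
--     previous_change = 100
--     momemtum_day = []
--     for i in range (1,(len(prices))):
--         if prices[i]-prices[i-1] > previous_change:
--             momemtum_day.append(i)
--
--         previous_change = prices[i]-prices[i-1]
--
--     return momemtum_day
-- ===== SOURCE B (Python) =====
-- def find_momentum_days(prices):
--     # Day 1 qualifies only if its jump beats the 100 sentinel.
--     head = [1] if len(prices) >= 2 and prices[1] - prices[0] > 100 else []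
--     # From day 2 on, "jump exceeds previous jump" is exactly a positive second
--     # difference: prices[i] - prices[i-1] > prices[i-1] - prices[i-2]
--     # iff a + c > 2*b for the consecutive triple (a, b, c).
--     return head + [i for i, (a, b, c)
--                    in enumerate(zip(prices, prices[1:], prices[2:]), 2)
--                    if a + c > 2 * b]
-- ===== Notes on version B (the rewrite author's own statement) =====
-- stated objective: alternative
-- what changed: B drops the difference comparison entirely: it handles day 1 (jump vs the 100 sentinel) as a separate head case, and for the remaining days recognises a momentum day as a positive SECOND difference, filtering enumerate(zip(prices, prices[1:], prices[2:]), 2) by a + c > 2*b — no running previous_change, no difference table, a window/convexity test over triples instead.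
import Mathlib
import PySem

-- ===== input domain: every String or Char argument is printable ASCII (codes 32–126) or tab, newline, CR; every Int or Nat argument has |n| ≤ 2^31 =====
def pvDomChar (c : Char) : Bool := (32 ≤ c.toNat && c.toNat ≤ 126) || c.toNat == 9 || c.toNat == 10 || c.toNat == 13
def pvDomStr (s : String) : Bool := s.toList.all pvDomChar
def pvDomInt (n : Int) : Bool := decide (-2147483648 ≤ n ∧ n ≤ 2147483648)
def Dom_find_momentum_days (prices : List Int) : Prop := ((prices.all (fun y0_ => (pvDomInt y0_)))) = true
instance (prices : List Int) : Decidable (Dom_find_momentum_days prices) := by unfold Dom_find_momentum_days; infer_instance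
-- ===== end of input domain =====

-- B replaces A's running previous_change loop with a head case for day 1 (jump vs the 100
-- sentinel) plus a positive-second-difference (a + c > 2*b) filter over enumerated triples
-- from zipping three shifted views of the list; same cost, different decomposition.

-- ===== PORT A =====
def find_momentum_days (prices : List Int) : List Int :=
  ((PySem.List.pyRange 1 (prices.length : Int) 1).foldl
    (fun (st : Int × List Int) i =>
      let diff := PySem.List.pyGetD prices i 0 - PySem.List.pyGetD prices (i - 1) 0
      (diff, if diff > st.1 then st.2 ++ [i] else st.2))
    (100, [])).2

-- ===== PORT B =====
def find_momentum_days_alt (prices : List Int) : List Int :=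
  let head : List Int :=
    if 2 ≤ prices.length ∧
        PySem.List.pyGetD prices 1 0 - PySem.List.pyGetD prices 0 0 > 100 then [1] else []
  head ++
    ((PySem.List.enumerate ((prices.zip (prices.drop 1)).zip (prices.drop 2)) 2).filter
        (fun p => p.2.1.1 + p.2.2 > 2 * p.2.1.2)).map (fun p => p.1)

-- ===== PRECONDITION & SPEC =====
def Spec_find_momentum_days (prices : List Int) (out : List Int) : Prop := out = find_momentum_days_alt prices
instance (prices : List Int) (out : List Int) : Decidable (Spec_find_momentum_days prices out) := by unfold Spec_find_momentum_days; infer_instance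

-- ===== CLAIM (what is proved, stated in full; the proofs are below) =====
def Claim_equal_find_momentum_days : Prop := ∀ (prices : List Int), Dom_find_momentum_days prices → Spec_find_momentum_days prices (find_momentum_days prices)

-- ===== LEMMAS AND PROOFS =====

-- A's loop, generalized over the range start, the carried previous_change and accumulator:
-- it appends exactly the i whose diff beats the previous diff (or p for the first index).
theorem loopA (n : Int) (f : Int → Int) :
    ∀ (a p : Int) (acc : List Int),
      (((PySem.List.pyRange a n 1).foldl
        (fun (st : Int × List Int) i =>
          (f i, if f i > st.1 then st.2 ++ [i] else st.2)) (p, acc)).2)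
      = acc ++ (PySem.List.pyRange a n 1).filter
          (fun i => f i > (if i = a then p else f (i - 1))) := by
  intro a
  by_cases h : a < n
  · have : (n - a).toNat ≠ 0 := by omega
    induction hm : (n - a).toNat generalizing a with
    | zero => omega
    | succ m ih =>
      intro p acc
      rw [PySem.List.pyRange_one_cons h]
      simp only [List.foldl_cons, List.filter_cons]
      by_cases ha : a + 1 < n
      · rw [ih (a+1) ha (by omega) (by omega)]
        have hfilt : (PySem.List.pyRange (a+1) n 1).filter
              (fun i => f i > (if i = a + 1 then f a else f (i - 1)))
            = (PySem.List.pyRange (a+1) n 1).filter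
              (fun i => f i > (if i = a then p else f (i - 1))) := by
          apply List.filter_congr
          intro i hi
          have hmem := (PySem.List.mem_pyRange_one).1 hi
          have h1 : i ≠ a := by omega
          by_cases h2 : i = a + 1
          · subst h2; simp [h1]
          · simp [h1, h2]
        rw [hfilt]
        by_cases hp : f a > p <;> simp [hp]
      · have hnil : PySem.List.pyRange (a+1) n 1 = [] :=
          PySem.List.pyRange_one_eq_nil (by omega)
        rw [hnil]
        simp only [List.foldl_nil, List.filter_nil]
        by_cases hp : f a > p <;> simp [hp]
  · intro p acc
    rw [PySem.List.pyRange_one_eq_nil (by omega)]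
    simp

-- pyGetD at a positive index steps past the head of a cons (in range).
theorem pyGetD_pos_cons (x : Int) (l : List Int) (j : Int) (h0 : 0 < j) (hl : j ≤ (l.length : Int)) :
    PySem.List.pyGetD (x :: l) j 0 = PySem.List.pyGetD l (j - 1) 0 := by
  rw [PySem.List.pyGetD_eq_getElem (x :: l) (i := j) 0 (by omega) (by simp only [List.length_cons]; omega),
      PySem.List.pyGetD_eq_getElem l (i := j - 1) 0 (by omega) (by omega)]
  have h : j.toNat = (j - 1).toNat + 1 := by omega
  simp only [h, List.getElem_cons_succ]

-- B's enumerated triple filter, expressed as an index filter over pyRange with pyGetD lookups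
-- at the relative positions i - s, i - s + 1, i - s + 2.
theorem zip3_filter : ∀ (l : List Int) (s : Int),
    (((PySem.List.enumerate ((l.zip (l.drop 1)).zip (l.drop 2)) s).filter
        (fun p => p.2.1.1 + p.2.2 > 2 * p.2.1.2)).map (fun p => p.1))
    = (PySem.List.pyRange s (s + ((l.length : Int) - 2)) 1).filter
        (fun i => PySem.List.pyGetD l (i - s) 0 + PySem.List.pyGetD l (i - s + 2) 0
                    > 2 * PySem.List.pyGetD l (i - s + 1) 0) := by
  intro l
  induction l with
  | nil =>
    intro s
    have hlen0 : ((([] : List Int)).length : Int) = 0 := by simp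
    rw [PySem.List.pyRange_one_eq_nil (by omega : s + (((([] : List Int)).length : Int) - 2) ≤ s)]
    simp
  | cons x xs ih =>
    intro s
    match xs with
    | [] =>
      have hlen1 : (((x :: ([] : List Int))).length : Int) = 1 := by simp
      rw [PySem.List.pyRange_one_eq_nil (by omega : s + ((((x :: ([] : List Int))).length : Int) - 2) ≤ s)]
      simp
    | [y] =>
      have hlen2 : (((x :: y :: ([] : List Int))).length : Int) = 2 := by simp
      rw [PySem.List.pyRange_one_eq_nil (by omega : s + ((((x :: y :: ([] : List Int))).length : Int) - 2) ≤ s)]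
      simp
    | y :: z :: zs =>
      have hzip : ((x :: y :: z :: zs).zip ((x :: y :: z :: zs).drop 1)).zip ((x :: y :: z :: zs).drop 2)
          = ((x, y), z) :: (((y :: z :: zs).zip ((y :: z :: zs).drop 1)).zip ((y :: z :: zs).drop 2)) := by
        cases zs <;> simp
      rw [hzip, PySem.List.enumerate_cons, List.filter_cons]
      have hlen : s < s + (((x :: y :: z :: zs).length : Int) - 2) := by simp; omega
      rw [PySem.List.pyRange_one_cons hlen, List.filter_cons]
      have hv1 : PySem.List.pyGetD (x :: y :: z :: zs) (s - s) 0 = x := by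
        rw [show s - s = (0 : Int) from by omega]
        simp [PySem.List.pyGetD_zero_cons]
      have hv3 : PySem.List.pyGetD (x :: y :: z :: zs) (s - s + 1) 0 = y := by
        rw [show s - s + 1 = (1 : Int) from by omega,
            pyGetD_pos_cons x _ 1 (by norm_num) (by simp only [List.length_cons]; omega),
            show (1 : Int) - 1 = 0 from by omega]
        simp [PySem.List.pyGetD_zero_cons]
      have hv2 : PySem.List.pyGetD (x :: y :: z :: zs) (s - s + 2) 0 = z := by
        rw [show s - s + 2 = (2 : Int) from by omega,
            pyGetD_pos_cons x _ 2 (by norm_num) (by simp only [List.length_cons]; omega),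
            show (2 : Int) - 1 = 1 from by omega,
            pyGetD_pos_cons y _ 1 (by norm_num) (by simp only [List.length_cons]; omega),
            show (1 : Int) - 1 = 0 from by omega]
        simp [PySem.List.pyGetD_zero_cons]
      have htail :
          (PySem.List.pyRange (s + 1) (s + (((x :: y :: z :: zs).length : Int) - 2)) 1).filter
            (fun i => PySem.List.pyGetD (x :: y :: z :: zs) (i - s) 0
                + PySem.List.pyGetD (x :: y :: z :: zs) (i - s + 2) 0
                > 2 * PySem.List.pyGetD (x :: y :: z :: zs) (i - s + 1) 0)
          = (PySem.List.pyRange (s + 1) ((s + 1) + (((y :: z :: zs).length : Int) - 2)) 1).filter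
            (fun i => PySem.List.pyGetD (y :: z :: zs) (i - (s + 1)) 0
                + PySem.List.pyGetD (y :: z :: zs) (i - (s + 1) + 2) 0
                > 2 * PySem.List.pyGetD (y :: z :: zs) (i - (s + 1) + 1) 0) := by
        have hb : s + (((x :: y :: z :: zs).length : Int) - 2)
            = (s + 1) + (((y :: z :: zs).length : Int) - 2) := by simp; omega
        rw [hb]
        apply List.filter_congr
        intro i hi
        have hmem := (PySem.List.mem_pyRange_one).1 hi
        have hlyzz : (((y :: z :: zs).length : Int)) = (zs.length : Int) + 2 := by simp; omega
        rw [pyGetD_pos_cons x _ (i - s) (by omega) (by simp only [List.length_cons] at hmem ⊢; omega),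
            pyGetD_pos_cons x _ (i - s + 2) (by omega) (by simp only [List.length_cons] at hmem ⊢; omega),
            pyGetD_pos_cons x _ (i - s + 1) (by omega) (by simp only [List.length_cons] at hmem ⊢; omega),
            show i - s - 1 = i - (s + 1) from by omega,
            show i - s + 2 - 1 = i - (s + 1) + 2 from by omega,
            show i - s + 1 - 1 = i - (s + 1) + 1 from by omega]
      rw [htail, ← ih (s + 1), hv1, hv2, hv3]
      by_cases hc : x + z > 2 * y
      · simp [hc]
      · simp [hc]

-- ===== VERDICT (by name: the statement is the Claim_ definition above) =====
theorem find_momentum_days_spec : Claim_equal_find_momentum_days := by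
  intro prices _
  unfold Spec_find_momentum_days find_momentum_days find_momentum_days_alt
  set n : Int := (prices.length : Int) with hn
  set f : Int → Int := fun i => PySem.List.pyGetD prices i 0 - PySem.List.pyGetD prices (i - 1) 0 with hf
  rw [loopA n f 1 100 []]
  simp only [List.nil_append]
  rw [zip3_filter prices 2]
  by_cases h2 : 2 ≤ prices.length
  · have h2' : (1 : Int) < n := by omega
    rw [PySem.List.pyRange_one_cons h2', show (1 : Int) + 1 = 2 from by norm_num,
        show (2 : Int) + (n - 2) = n from by omega, List.filter_cons]
    have htail : (PySem.List.pyRange 2 n 1).filter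
          (fun i => f i > (if i = 1 then 100 else f (i - 1)))
        = (PySem.List.pyRange 2 n 1).filter
          (fun i => PySem.List.pyGetD prices (i - 2) 0 + PySem.List.pyGetD prices (i - 2 + 2) 0
              > 2 * PySem.List.pyGetD prices (i - 2 + 1) 0) := by
      apply List.filter_congr
      intro i hi
      have hmem := (PySem.List.mem_pyRange_one).1 hi
      have h1 : i ≠ (1 : Int) := by omega
      simp only [hf]
      rw [show i - 2 + 2 = i from by omega, show i - 2 + 1 = i - 1 from by omega,
          if_neg h1, show i - 1 - 1 = i - 2 from by omega, decide_eq_decide]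
      omega
    rw [htail]
    have hhead : (PySem.List.pyGetD prices 1 0 - PySem.List.pyGetD prices 0 0 > 100) ↔
        f 1 > (100 : Int) := by
      norm_num [hf]
    by_cases hc : f 1 > (100 : Int)
    · simp [h2, hc, hhead]
    · simp [h2, hc, hhead]
  · have ha : PySem.List.pyRange 1 n 1 = [] := PySem.List.pyRange_one_eq_nil (by omega)
    have hb : PySem.List.pyRange 2 (2 + (n - 2)) 1 = [] := PySem.List.pyRange_one_eq_nil (by omega)
    rw [ha, hb]
    simp [h2]
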